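-- pv_equiv track=rewrite | github.com/max01mald/Python_WebSocket | Lab3/server.py | Find
-- ===== SOURCE A (Python) =====
-- def Find(string):
-- 	i =0
-- 	count = 0
-- 	while i < len(string):
-- 		if string[i] == "/":
-- 			count += 1
-- 			if count == 2:
-- 				return string[i:len(string)]
-- 		i += 1
-- ===== SOURCE B (Python) =====
-- def Find(string):
--     head, sep1, rest = string.partition('/')
--     if not sep1:
--         return None
--     mid, sep2, tail = rest.partition('/')
--     if not sep2:
--         return None
--     return sep2 + tail
-- ===== Notes on version B (the rewrite author's own statement) =====
-- stated objective: idiomatic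
-- what changed: Replaced the index-and-counter while loop with two str.partition splits on the slash character: take the remainder after the first slash, partition it again, and return the second slash plus its tail.
import Mathlib
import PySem

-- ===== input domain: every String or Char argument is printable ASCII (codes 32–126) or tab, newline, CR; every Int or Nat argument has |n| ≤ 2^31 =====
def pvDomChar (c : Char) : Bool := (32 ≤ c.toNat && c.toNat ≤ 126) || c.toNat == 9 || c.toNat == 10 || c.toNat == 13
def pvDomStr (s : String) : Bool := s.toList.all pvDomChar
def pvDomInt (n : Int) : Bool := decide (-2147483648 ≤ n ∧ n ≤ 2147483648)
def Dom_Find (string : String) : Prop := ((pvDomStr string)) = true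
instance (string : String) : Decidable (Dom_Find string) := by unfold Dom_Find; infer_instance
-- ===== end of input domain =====

-- B is the idiomatic str.partition rewrite of A's index/counter scan; equal return value on all inputs (A is total, returning None when fewer than two slashes occur).

-- ===== PORT A =====
-- A's while loop over index i with a slash counter; the remaining suffix c :: rest
-- stands for string[i:len(string)], so `some (c :: rest)` is `return string[i:len(string)]`.
def findLoopA : List Char → Nat → Option (List Char)
  | [], _ => none
  | c :: rest, count =>
    if c = '/' then
      (if count + 1 = 2 then some (c :: rest) else findLoopA rest (count + 1))
    else findLoopA rest count

def Find (string : String) : Option String :=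
  (findLoopA string.toList 0).map String.ofList

-- ===== PORT B =====
-- str.partition('/'): returns the part after the first '/', or none if no '/'.
def partAfterSlash : List Char → Option (List Char)
  | [] => none
  | c :: rest => if c = '/' then some rest else partAfterSlash rest

def Find_alt (string : String) : Option String :=
  match partAfterSlash string.toList with
  | none => none
  | some rest =>
    match partAfterSlash rest with
    | none => none
    | some tail => some (String.ofList ('/' :: tail))

-- ===== PRECONDITION & SPEC =====
def Spec_Find (string : String) (out : Option String) : Prop := out = Find_alt string
instance (string : String) (out : Option String) : Decidable (Spec_Find string out) := by unfold Spec_Find; infer_instance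

-- ===== CLAIM (what is proved, stated in full; the proofs are below) =====
def Claim_equal_Find : Prop := ∀ (string : String), Dom_Find string → Spec_Find string (Find string)

-- ===== LEMMAS AND PROOFS =====
theorem findLoopA_one (l : List Char) :
    findLoopA l 1 = (partAfterSlash l).map (fun t => '/' :: t) := by
  induction l with
  | nil => rfl
  | cons c rest ih =>
    by_cases h : c = '/'
    · subst h; simp [findLoopA, partAfterSlash]
    · simp [findLoopA, partAfterSlash, h, ih]

theorem findLoopA_zero (l : List Char) :
    findLoopA l 0 = (partAfterSlash l).bind (fun r => findLoopA r 1) := by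
  induction l with
  | nil => rfl
  | cons c rest ih =>
    by_cases h : c = '/'
    · subst h; simp [findLoopA, partAfterSlash]
    · simp [findLoopA, partAfterSlash, h, ih]

-- ===== VERDICT (by name: the statement is the Claim_ definition above) =====
theorem Find_spec : Claim_equal_Find := by
  intro s _
  unfold Spec_Find Find Find_alt
  rw [findLoopA_zero]
  cases h1 : partAfterSlash s.toList with
  | none => rfl
  | some rest =>
    simp only [Option.bind_some, findLoopA_one]
    cases h2 : partAfterSlash rest <;> rfl
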